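-- pv_equiv track=rewrite | github.com/creative-darkstar/sparta-algorithm | 프로그래머스/1/17681. ［1차］ 비밀지도/［1차］ 비밀지도.py | solution
-- ===== SOURCE A (Python) =====
-- def dec_to_bin(num, n):
--     result = []
--     for _ in range(n):
--         result.append(num % 2)
--         num = num // 2
--     return result[::-1]
--
-- def solution(n, arr1, arr2):
--     answer = []
--     for i in range(n):
--         tmp = ""
--         line_1 = dec_to_bin(arr1[i], n)
--         line_2 = dec_to_bin(arr2[i], n)
--         for j in range(n):
--             if line_1[j] or line_2[j]:
--                 tmp += '#'
--             else:
--                 tmp += ' '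
--         answer.append(tmp)
--
--     return answer
-- ===== SOURCE B (Python) =====
-- def solution(n, arr1, arr2):
--     def make_row(a, b):
--         row = ''
--         for _ in range(n):
--             row = ('#' if a % 2 or b % 2 else ' ') + row
--             a //= 2
--             b //= 2
--         return row
--     return [make_row(arr1[i], arr2[i]) for i in range(n)]
-- ===== Notes on version B (the rewrite author's own statement) =====
-- stated objective: simpler
-- what changed: Each row is built in one fused pass that prepends a character while halving both numbers together, instead of materialising two n-element bit lists per row, reversing them and comparing them position by position in a third loop; the dec_to_bin helper disappears.
import Mathlib
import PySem

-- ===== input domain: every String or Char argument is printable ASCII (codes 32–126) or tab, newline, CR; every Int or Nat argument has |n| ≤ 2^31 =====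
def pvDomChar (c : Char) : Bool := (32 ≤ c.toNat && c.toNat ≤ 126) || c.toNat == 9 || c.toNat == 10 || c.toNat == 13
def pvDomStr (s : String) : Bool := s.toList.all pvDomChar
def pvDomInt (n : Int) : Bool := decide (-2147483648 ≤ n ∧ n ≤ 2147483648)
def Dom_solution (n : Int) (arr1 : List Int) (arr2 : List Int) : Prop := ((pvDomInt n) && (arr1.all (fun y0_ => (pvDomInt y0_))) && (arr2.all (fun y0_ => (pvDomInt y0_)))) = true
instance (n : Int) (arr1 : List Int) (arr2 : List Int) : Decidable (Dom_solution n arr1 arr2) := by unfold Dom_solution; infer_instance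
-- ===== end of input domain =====

-- B builds each row in one fused pass (prepend a char while halving both numbers) instead of
-- A's two per-row bit lists plus a third comparison loop; return values agree wherever A returns.

-- ===== PORT A =====
-- helper dec_to_bin: loop `for _ in range(n)` carried as a foldl over pyRange with state (result, num);
-- `result[::-1]` is List.reverse (exact: full reverse slice).
def dec_to_bin (num : Int) (n : Int) : List Int :=
  ((PySem.List.pyRange 0 n 1).foldl
    (fun (st : List Int × Int) _ => (st.1 ++ [PySem.Int.mod st.2 2], PySem.Int.floordiv st.2 2))
    ([], num)).1.reverse

-- arr1[i] / line_1[j]: indices come from range(n), in range under Pre_; ported as pyGetD (total form).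
def solution (n : Int) (arr1 : List Int) (arr2 : List Int) : List String :=
  (PySem.List.pyRange 0 n 1).foldl (fun answer i =>
    let line_1 := dec_to_bin (PySem.List.pyGetD arr1 i 0) n
    let line_2 := dec_to_bin (PySem.List.pyGetD arr2 i 0) n
    let tmp := (PySem.List.pyRange 0 n 1).foldl (fun tmp j =>
      tmp ++ (if PySem.List.pyGetD line_1 j 0 ≠ 0 ∨ PySem.List.pyGetD line_2 j 0 ≠ 0 then "#" else " ")) ""
    answer ++ [tmp]) []

-- ===== PORT B =====
-- make_row's counted loop `for _ in range(n)`: structural recursion on the remaining iteration count.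
def makeRowGo (a : Int) (b : Int) (row : String) : Nat → String
  | 0 => row
  | k+1 => makeRowGo (PySem.Int.floordiv a 2) (PySem.Int.floordiv b 2)
      ((if PySem.Int.mod a 2 ≠ 0 ∨ PySem.Int.mod b 2 ≠ 0 then "#" else " ") ++ row) k

def make_row (a : Int) (b : Int) (n : Int) : String := makeRowGo a b "" n.toNat

def solution_alt (n : Int) (arr1 : List Int) (arr2 : List Int) : List String :=
  (PySem.List.pyRange 0 n 1).map (fun i =>
    make_row (PySem.List.pyGetD arr1 i 0) (PySem.List.pyGetD arr2 i 0) n)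

-- ===== PRECONDITION & SPEC =====
-- Python A raises IndexError iff n exceeds a list's length (both loops index arr1[i], arr2[i] for i < n).
def Pre_solution (n : Int) (arr1 : List Int) (arr2 : List Int) : Prop :=
  n ≤ (arr1.length : Int) ∧ n ≤ (arr2.length : Int)
instance (n : Int) (arr1 : List Int) (arr2 : List Int) : Decidable (Pre_solution n arr1 arr2) := by unfold Pre_solution; infer_instance
def pvWitness_solution : Int × List Int × List Int := (2, [1, 2], [2, 1])

def Spec_solution (n : Int) (arr1 : List Int) (arr2 : List Int) (out : List String) : Prop := out = solution_alt n arr1 arr2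
instance (n : Int) (arr1 : List Int) (arr2 : List Int) (out : List String) : Decidable (Spec_solution n arr1 arr2 out) := by unfold Spec_solution; infer_instance

-- ===== CLAIM (what is proved, stated in full; the proofs are below) =====
def Claim_equal_solution : Prop := ∀ (n : Int) (arr1 : List Int) (arr2 : List Int), Dom_solution n arr1 arr2 → Pre_solution n arr1 arr2 → Spec_solution n arr1 arr2 (solution n arr1 arr2)

-- ===== LEMMAS AND PROOFS =====

-- bit list of a, low bit first, m bits
def lowbits : Int → Nat → List Int
  | _, 0 => []
  | a, m+1 => PySem.Int.mod a 2 :: lowbits (PySem.Int.floordiv a 2) m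

-- combined row characters, low bit first, m chars
def clist : Int → Int → Nat → List Char
  | _, _, 0 => []
  | a, b, m+1 => (if PySem.Int.mod a 2 ≠ 0 ∨ PySem.Int.mod b 2 ≠ 0 then '#' else ' ')
      :: clist (PySem.Int.floordiv a 2) (PySem.Int.floordiv b 2) m

theorem lowbits_length (a : Int) (m : Nat) : (lowbits a m).length = m := by
  induction m generalizing a with
  | zero => rfl
  | succ m ih => simp [lowbits, ih]

theorem clist_length (a b : Int) (m : Nat) : (clist a b m).length = m := by
  induction m generalizing a b with
  | zero => rfl
  | succ m ih => simp [clist, ih]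

theorem clist_getD (m : Nat) (a b : Int) (k : Nat) (hk : k < m) :
    (clist a b m).getD k ' ' =
      if (lowbits a m).getD k 0 ≠ 0 ∨ (lowbits b m).getD k 0 ≠ 0 then '#' else ' ' := by
  induction m generalizing a b k with
  | zero => omega
  | succ m ih =>
    cases k with
    | zero => simp [clist, lowbits]
    | succ k => simpa [clist, lowbits] using ih _ _ k (by omega)

theorem go_fst (xs : List Int) (acc : List Int) (a : Int) :
    (xs.foldl (fun (st : List Int × Int) _ =>
        (st.1 ++ [PySem.Int.mod st.2 2], PySem.Int.floordiv st.2 2)) (acc, a)).1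
      = acc ++ lowbits a xs.length := by
  induction xs generalizing acc a with
  | nil => simp [lowbits]
  | cons x xs ih =>
    simp only [List.foldl_cons]
    rw [ih]
    rw [show lowbits a (x :: xs).length = PySem.Int.mod a 2 :: lowbits (PySem.Int.floordiv a 2) xs.length from rfl]
    simp [List.append_assoc]

theorem dec_to_bin_eq (a n : Int) : dec_to_bin a n = (lowbits a n.toNat).reverse := by
  unfold dec_to_bin
  rw [go_fst]
  simp [PySem.List.length_pyRange_one]

theorem foldl_pyRange_zero {β : Type} (f : β → Int → β) (init : β) (n : Int) :
    (PySem.List.pyRange 0 n 1).foldl f init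
      = (List.range n.toNat).foldl (fun s (k : Nat) => f s (k : Int)) init := by
  rw [PySem.List.pyRange_one, List.foldl_map]
  simp only [sub_zero, zero_add]

theorem ite_str (c : Prop) [Decidable c] :
    (if c then "#" else " ") = String.ofList [if c then '#' else ' '] := by
  split <;> decide

theorem foldl_append_chr (g : Nat → Char) (k : Nat) (s : String) :
    (List.range k).foldl (fun t j => t ++ String.ofList [g j]) s
      = s ++ String.ofList ((List.range k).map g) := by
  induction k with
  | zero => simp
  | succ k ih =>
    rw [List.range_succ, List.foldl_append, List.map_append, ih]
    simp [String.ofList_append, String.append_assoc]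

theorem rowGo_spec (m : Nat) (a b : Int) (s : String) :
    makeRowGo a b s m = String.ofList (clist a b m).reverse ++ s := by
  induction m generalizing a b s with
  | zero => simp [makeRowGo, clist]
  | succ m ih =>
    rw [makeRowGo, ih]
    simp [clist, String.ofList_append, String.append_assoc, ite_str]

theorem map_range_eq_rev (a b : Int) (m : Nat) :
    (List.range m).map (fun j =>
        if (lowbits a m).reverse.getD j 0 ≠ 0 ∨ (lowbits b m).reverse.getD j 0 ≠ 0 then '#' else ' ')
      = (clist a b m).reverse := by
  apply List.ext_getElem
  · simp [clist_length]
  · intro j h1 h2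
    have hj : j < m := by simpa using h1
    have hga : (lowbits a m).reverse.getD j 0 = (lowbits a m).getD (m - 1 - j) 0 := by
      rw [List.getD_eq_getElem _ _ (by simp [lowbits_length]; omega),
          List.getD_eq_getElem _ _ (by simp [lowbits_length]; omega),
          List.getElem_reverse]
      simp [lowbits_length]
    have hgb : (lowbits b m).reverse.getD j 0 = (lowbits b m).getD (m - 1 - j) 0 := by
      rw [List.getD_eq_getElem _ _ (by simp [lowbits_length]; omega),
          List.getD_eq_getElem _ _ (by simp [lowbits_length]; omega),
          List.getElem_reverse]
      simp [lowbits_length]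
    have hc : (clist a b m).reverse[j]'h2 = (clist a b m).getD (m - 1 - j) ' ' := by
      rw [List.getElem_reverse, List.getD_eq_getElem _ _ (by simp [clist_length]; omega)]
      simp [clist_length]
    simp only [List.getElem_map, List.getElem_range, hc,
      clist_getD m a b (m - 1 - j) (by omega), hga, hgb]

theorem row_eq (a b n : Int) :
    (PySem.List.pyRange 0 n 1).foldl (fun tmp j =>
      tmp ++ (if PySem.List.pyGetD (dec_to_bin a n) j 0 ≠ 0 ∨
                 PySem.List.pyGetD (dec_to_bin b n) j 0 ≠ 0 then "#" else " ")) ""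
      = make_row a b n := by
  rw [foldl_pyRange_zero]
  simp only [dec_to_bin_eq, PySem.List.pyGetD_natCast, ite_str]
  rw [foldl_append_chr (fun k =>
    if (lowbits a n.toNat).reverse.getD k 0 ≠ 0 ∨ (lowbits b n.toNat).reverse.getD k 0 ≠ 0
    then '#' else ' ')]
  rw [make_row, rowGo_spec, map_range_eq_rev]
  simp

theorem ports_eq (n : Int) (arr1 arr2 : List Int) :
    solution n arr1 arr2 = solution_alt n arr1 arr2 := by
  unfold solution solution_alt
  rw [PySem.List.foldl_append_singleton_eq_map (fun i =>
    (PySem.List.pyRange 0 n 1).foldl (fun tmp j =>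
      tmp ++ (if PySem.List.pyGetD (dec_to_bin (PySem.List.pyGetD arr1 i 0) n) j 0 ≠ 0 ∨
                 PySem.List.pyGetD (dec_to_bin (PySem.List.pyGetD arr2 i 0) n) j 0 ≠ 0
              then "#" else " ")) "")]
  simp only [List.nil_append]
  exact List.map_congr_left (fun i _ => row_eq _ _ n)

-- ===== VERDICT (by name: the statement is the Claim_ definition above) =====
theorem solution_spec : Claim_equal_solution := by
  intro n arr1 arr2 _ _
  unfold Spec_solution
  exact ports_eq n arr1 arr2
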